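-- pv_equiv track=rewrite | github.com/jflammia/commuteTracker | src/processing/segmenter.py | _assign_segment_ids
-- ===== SOURCE A (Python) =====
-- def _assign_segment_ids(
--     modes: list[str],
--     force_boundaries: list[int] | None = None,
-- ) -> list[int]:
--     """Assign segment IDs: each contiguous run of the same mode gets an ID.
--
--     force_boundaries: indices where a new segment must start regardless of mode.
--     """
--     if not modes:
--         return []
--
--     boundary_set = set(force_boundaries or [])
--
--     segment_ids = [0]
--     current_id = 0
--     for i in range(1, len(modes)):
--         if modes[i] != modes[i - 1] or i in boundary_set:
--             current_id += 1
--         segment_ids.append(current_id)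
--
--     return segment_ids
-- ===== SOURCE B (Python) =====
-- def _assign_segment_ids(
--     modes: list[str],
--     force_boundaries: list[int] | None = None,
-- ) -> list[int]:
--     """Find segment start positions first, then replicate each segment ID by run length."""
--     n = len(modes)
--     boundary_set = set(force_boundaries or [])
--
--     starts = [
--         i for i in range(n)
--         if i == 0 or modes[i] != modes[i - 1] or i in boundary_set
--     ]
--     ends = starts[1:] + [n]
--
--     out = []
--     for sid, (s, e) in enumerate(zip(starts, ends)):
--         out += [sid] * (e - s)
--     return out
-- ===== Notes on version B (the rewrite author's own statement) =====
-- stated objective: alternative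
-- what changed: Instead of one loop threading a current_id counter over every index, B first extracts the list of segment start positions, zips each start with the next start (or the list end), and builds the output by replicating each segment id by its run length.
import Mathlib
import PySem

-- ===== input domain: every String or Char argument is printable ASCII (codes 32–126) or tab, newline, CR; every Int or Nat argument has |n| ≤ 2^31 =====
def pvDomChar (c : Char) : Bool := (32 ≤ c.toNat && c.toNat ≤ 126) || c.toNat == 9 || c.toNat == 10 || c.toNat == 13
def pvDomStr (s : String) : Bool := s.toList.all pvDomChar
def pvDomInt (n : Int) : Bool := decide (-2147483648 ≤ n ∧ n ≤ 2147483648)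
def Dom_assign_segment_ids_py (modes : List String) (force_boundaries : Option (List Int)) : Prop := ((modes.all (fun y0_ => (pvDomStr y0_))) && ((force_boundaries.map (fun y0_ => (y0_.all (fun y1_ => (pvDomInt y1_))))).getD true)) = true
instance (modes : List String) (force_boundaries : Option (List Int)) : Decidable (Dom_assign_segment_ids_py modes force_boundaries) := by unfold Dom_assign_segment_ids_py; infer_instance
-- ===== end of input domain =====

-- B replaces A's single id-threading loop by a different decomposition: it first extracts the
-- segment START positions, pairs each with the next start (or the end), and builds the output
-- by replicating each segment id by its run length (same O(n) cost, different algorithm shape).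


-- ===== PORT A =====
def assign_segment_ids_py (modes : List String) (force_boundaries : Option (List Int)) : List Int :=
  if modes = [] then []
  else
    let boundary_set : PySem.Set Int := PySem.Set.ofList (force_boundaries.getD [])
    let res := (PySem.List.pyRange 1 (modes.length : Int) 1).foldl
      (fun (st : List Int × Int) i =>
        let current_id :=
          if PySem.List.pyGet? modes i ≠ PySem.List.pyGet? modes (i - 1) ∨ PySem.Set.contains boundary_set i
          then st.2 + 1 else st.2
        (st.1 ++ [current_id], current_id))
      ([0], 0)
    res.1

-- ===== PORT B =====
def assign_segment_ids_py_alt (modes : List String) (force_boundaries : Option (List Int)) : List Int :=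
  let n : Int := (modes.length : Int)
  let boundary_set : PySem.Set Int := PySem.Set.ofList (force_boundaries.getD [])
  let starts : List Int := (PySem.List.pyRange 0 n 1).filter
    (fun i => i == 0 || decide (PySem.List.pyGet? modes i ≠ PySem.List.pyGet? modes (i - 1) ∨ PySem.Set.contains boundary_set i))
  let ends : List Int := starts.drop 1 ++ [n]
  (PySem.List.enumerate (starts.zip ends) 0).foldl
    (fun out p => out ++ PySem.List.pyRepeat [p.1] (p.2.2 - p.2.1)) []

-- ===== PRECONDITION & SPEC =====
def Spec_assign_segment_ids_py (modes : List String) (force_boundaries : Option (List Int)) (out : List Int) : Prop := out = assign_segment_ids_py_alt modes force_boundaries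
instance (modes : List String) (force_boundaries : Option (List Int)) (out : List Int) : Decidable (Spec_assign_segment_ids_py modes force_boundaries out) := by unfold Spec_assign_segment_ids_py; infer_instance

-- ===== CLAIM (what is proved, stated in full; the proofs are below) =====
def Claim_equal_assign_segment_ids_py : Prop := ∀ (modes : List String) (force_boundaries : Option (List Int)), Dom_assign_segment_ids_py modes force_boundaries → Spec_assign_segment_ids_py modes force_boundaries (assign_segment_ids_py modes force_boundaries)

-- ===== LEMMAS AND PROOFS =====

-- itertools.accumulate-style running sum (proof-side helper, used to characterise A's loop)
def pvAccum : Int → List Int → List Int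
  | _, [] => []
  | t, x :: xs => (t + x) :: pvAccum (t + x) xs

-- run expansion: given segment starts and the total length, replicate each id by run length
def pvExpand (sid : Int) (n : Int) : List Int → List Int
  | [] => []
  | [s] => List.replicate (n - s).toNat sid
  | s :: s' :: r => List.replicate (s' - s).toNat sid ++ pvExpand (sid + 1) n (s' :: r)

-- number of boundaries among indices 1..k
def pvCnt (q : Int → Bool) (k : Int) : Int := (((PySem.List.pyRange 1 (k + 1) 1).countP q : Nat) : Int)

-- the common characterisation: position k gets id = number of boundaries ≤ k
def pvAcc (q : Int → Bool) (n : Int) : List Int := (PySem.List.pyRange 0 n 1).map (fun k => pvCnt q k)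

def pvStarts (q : Int → Bool) (n : Int) : List Int :=
  (PySem.List.pyRange 0 n 1).filter (fun i => i == 0 || q i)

theorem pvAccum_append_singleton (t : Int) (l : List Int) (x : Int) :
    pvAccum t (l ++ [x]) = pvAccum t l ++ [t + l.sum + x] := by
  induction l generalizing t with
  | nil => simp [pvAccum]
  | cons y ys ih => simp [pvAccum, ih, add_assoc]

theorem pvCnt_succ (q : Int → Bool) (n : Int) (h : 1 ≤ n) :
    pvCnt q n = pvCnt q (n - 1) + (if q n then 1 else 0) := by
  unfold pvCnt
  rw [PySem.List.pyRange_one_succ_right h, show n - 1 + 1 = n by ring]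
  by_cases hq : q n
  · simp [List.countP_append, List.countP_cons, hq]
  · simp [List.countP_append, List.countP_cons, hq]

theorem pvCnt_zero (q : Int → Bool) : pvCnt q 0 = 0 := by
  simp [pvCnt, PySem.List.pyRange_one_eq_nil]

theorem pvAcc_succ (q : Int → Bool) (n : Int) (h : 0 ≤ n) :
    pvAcc q (n + 1) = pvAcc q n ++ [pvCnt q n] := by
  unfold pvAcc
  rw [PySem.List.pyRange_one_succ_right h]
  simp

-- ---- A-side: the loop builds the accumulate of 0/1 indicators ----
theorem foldA_eq_accum (b : Int → Int) (L : List Int) :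
    ∀ (ids : List Int) (cid : Int),
      (L.foldl
        (fun (st : List Int × Int) i =>
          let current_id := st.2 + b i
          (st.1 ++ [current_id], current_id)) (ids, cid)).1
      = ids ++ pvAccum cid (L.map b) := by
  induction L with
  | nil => intro ids cid; simp [pvAccum]
  | cons x xs ih =>
    intro ids cid
    simp only [List.foldl_cons, List.map_cons, pvAccum]
    rw [ih]
    simp

theorem indicator_ite (cond : Prop) [Decidable cond] (c : Int) :
    (if cond then c + 1 else c) = c + (if cond then 1 else 0) := by
  split_ifs <;> simp

theorem sum_map_indicator (q : Int → Bool) (l : List Int) :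
    (l.map (fun i => if q i then (1 : Int) else 0)).sum = ((l.countP q : Nat) : Int) := by
  induction l with
  | nil => simp
  | cons x xs ih =>
    simp only [List.map_cons, List.sum_cons, List.countP_cons, ih]
    by_cases h : q x
    · simp [h]
      push_cast
      ring
    · simp [h]

theorem accum_eq_pvAcc (q : Int → Bool) (n : Int) (h : 1 ≤ n) :
    0 :: pvAccum 0 ((PySem.List.pyRange 1 n 1).map (fun i => if q i then (1 : Int) else 0))
    = pvAcc q n := by
  induction n, h using Int.le_induction with
  | base =>
    have h11 : PySem.List.pyRange 1 1 1 = ([] : List Int) := by decide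
    have h01 : PySem.List.pyRange 0 1 1 = [(0 : Int)] := by decide
    simp [h11, h01, pvAccum, pvAcc, pvCnt_zero]
  | succ n hn ih =>
    rw [PySem.List.pyRange_one_succ_right hn, List.map_append, List.map_singleton,
      pvAccum_append_singleton, pvAcc_succ q n (by omega), ← ih]
    simp only [List.cons_append, List.nil_append]
    congr 2
    have hc : (((PySem.List.pyRange 1 n 1).countP q : Nat) : Int) = pvCnt q (n - 1) := by
      unfold pvCnt; rw [show n - 1 + 1 = n by ring]
    rw [sum_map_indicator, hc, pvCnt_succ q n hn]
    ring

-- ---- B-side: the fold over enumerate/zip is pvExpand ----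
theorem foldB_eq_expand (n : Int) :
    ∀ (starts : List Int) (sid : Int) (pre : List Int),
      (PySem.List.enumerate (starts.zip (starts.drop 1 ++ [n])) sid).foldl
        (fun out p => out ++ PySem.List.pyRepeat [p.1] (p.2.2 - p.2.1)) pre
      = pre ++ pvExpand sid n starts := by
  intro starts
  induction starts with
  | nil => intro sid pre; simp [PySem.List.enumerate_nil, pvExpand]
  | cons s rest ih =>
    intro sid pre
    cases rest with
    | nil =>
      simp [PySem.List.enumerate_cons, PySem.List.enumerate_nil, pvExpand,
        PySem.List.pyRepeat_singleton]
    | cons s' r =>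
      have hz : (s :: s' :: r).zip ((s :: s' :: r).drop 1 ++ [n])
          = (s, s') :: (s' :: r).zip ((s' :: r).drop 1 ++ [n]) := by simp
      rw [hz, PySem.List.enumerate_cons, List.foldl_cons, ih (sid + 1)]
      simp [pvExpand, PySem.List.pyRepeat_singleton]

theorem expand_extend (sid n : Int) :
    ∀ (S : List Int), S ≠ [] → (∀ x ∈ S, x ≤ n) →
      pvExpand sid (n + 1) S = pvExpand sid n S ++ [sid + (S.length : Int) - 1] := by
  intro S
  induction S generalizing sid with
  | nil => intro h; exact absurd rfl h
  | cons s rest ih =>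
    intro _ hb
    cases rest with
    | nil =>
      have hs : s ≤ n := hb s (by simp)
      have : (n + 1 - s).toNat = (n - s).toNat + 1 := by omega
      simp [pvExpand, this, List.replicate_succ']
    | cons s' r =>
      have hrec := ih (sid := sid + 1) (by simp) (fun x hx => hb x (by simp [hx]))
      calc pvExpand sid (n + 1) (s :: s' :: r)
          = List.replicate (s' - s).toNat sid ++ pvExpand (sid + 1) (n + 1) (s' :: r) := rfl
        _ = List.replicate (s' - s).toNat sid
            ++ (pvExpand (sid + 1) n (s' :: r) ++ [sid + 1 + ((s' :: r).length : Int) - 1]) := by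
            rw [hrec]
        _ = pvExpand sid n (s :: s' :: r) ++ [sid + ((s :: s' :: r).length : Int) - 1] := by
            simp only [pvExpand, List.append_assoc]
            congr 3
            simp only [List.length_cons]
            push_cast
            ring

theorem expand_new_start (n : Int) :
    ∀ (S : List Int) (sid : Int), S ≠ [] →
      pvExpand sid (n + 1) (S ++ [n]) = pvExpand sid n S ++ [sid + (S.length : Int)] := by
  intro S
  induction S with
  | nil => intro sid h; exact absurd rfl h
  | cons s rest ih =>
    intro sid _
    cases rest with
    | nil =>
      simp [pvExpand, show (n + 1 - n).toNat = 1 by omega]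
    | cons s' r =>
      have hrec := ih (sid + 1) (by simp)
      calc pvExpand sid (n + 1) ((s :: s' :: r) ++ [n])
          = List.replicate (s' - s).toNat sid ++ pvExpand (sid + 1) (n + 1) ((s' :: r) ++ [n]) := rfl
        _ = List.replicate (s' - s).toNat sid
            ++ (pvExpand (sid + 1) n (s' :: r) ++ [sid + 1 + ((s' :: r).length : Int)]) := by
            rw [hrec]
        _ = pvExpand sid n (s :: s' :: r) ++ [sid + ((s :: s' :: r).length : Int)] := by
            simp only [pvExpand, List.append_assoc]
            congr 3
            simp only [List.length_cons]
            push_cast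
            ring

theorem starts_succ (q : Int → Bool) (n : Int) (h : 0 ≤ n) :
    pvStarts q (n + 1) = pvStarts q n ++ (if (n == 0 || q n) then [n] else []) := by
  unfold pvStarts
  rw [PySem.List.pyRange_one_succ_right h]
  simp [List.filter_append]
  split_ifs <;> simp_all

theorem starts_mem_lt (q : Int → Bool) (n : Int) : ∀ x ∈ pvStarts q n, 0 ≤ x ∧ x < n := by
  intro x hx
  unfold pvStarts at hx
  have := (List.mem_filter.mp hx).1
  exact (PySem.List.mem_pyRange_one).mp this

theorem expand_starts (q : Int → Bool) (n : Int) (h : 1 ≤ n) :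
    pvStarts q n ≠ []
    ∧ ((pvStarts q n).length : Int) = pvCnt q (n - 1) + 1
    ∧ pvExpand 0 n (pvStarts q n) = pvAcc q n := by
  induction n, h using Int.le_induction with
  | base =>
    have h01 : PySem.List.pyRange 0 1 1 = [(0 : Int)] := by decide
    have hs1 : pvStarts q 1 = [0] := by simp [pvStarts, h01]
    have he : pvExpand 0 1 [0] = [0] := by decide
    refine ⟨by simp [hs1], by simp [hs1, pvCnt_zero], ?_⟩
    rw [hs1, he]
    simp [pvAcc, h01, pvCnt_zero]
  | succ n hn ih =>
    obtain ⟨hne, hlen, hexp⟩ := ih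
    have hq0 : (n == 0) = false := by simp; omega
    have hsub : n + 1 - 1 = n := by ring
    rw [starts_succ q n (by omega), hq0]
    simp only [Bool.false_or]
    rw [pvAcc_succ q n (by omega)]
    by_cases hq : q n
    · rw [if_pos hq]
      refine ⟨by simp, ?_, ?_⟩
      · rw [hsub, pvCnt_succ q n hn, if_pos hq]
        simp only [List.length_append, List.length_cons, List.length_nil]
        push_cast
        omega
      · rw [expand_new_start n (pvStarts q n) 0 hne, hexp, pvCnt_succ q n hn, if_pos hq, hlen]
        simp
    · rw [if_neg hq, List.append_nil]
      refine ⟨hne, ?_, ?_⟩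
      · rw [hsub, pvCnt_succ q n hn, if_neg hq]
        omega
      · rw [expand_extend 0 n (pvStarts q n) hne
          (fun x hx => by have := starts_mem_lt q n x hx; omega), hexp, pvCnt_succ q n hn, if_neg hq, hlen]
        simp

-- ===== VERDICT (by name: the statement is the Claim_ definition above) =====
theorem assign_segment_ids_py_spec : Claim_equal_assign_segment_ids_py := by
  intro modes fb _
  unfold Spec_assign_segment_ids_py assign_segment_ids_py assign_segment_ids_py_alt
  by_cases h : modes = []
  · simp [h, PySem.List.pyRange_one_eq_nil, PySem.List.enumerate_nil]
  · have hn : 1 ≤ (modes.length : Int) := by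
      have : modes.length ≠ 0 := by simpa [List.length_eq_zero_iff] using h
      omega
    simp only [h, if_false]
    set bset : PySem.Set Int := PySem.Set.ofList (fb.getD []) with hbset
    set q : Int → Bool := fun i =>
      decide (PySem.List.pyGet? modes i ≠ PySem.List.pyGet? modes (i - 1) ∨ PySem.Set.contains bset i) with hqdef
    -- A-side
    have hstep : (fun (st : List Int × Int) i =>
        let current_id :=
          if PySem.List.pyGet? modes i ≠ PySem.List.pyGet? modes (i - 1) ∨ PySem.Set.contains bset i
          then st.2 + 1 else st.2
        (st.1 ++ [current_id], current_id))
      = (fun (st : List Int × Int) i =>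
        let current_id := st.2 + (if q i then (1 : Int) else 0)
        (st.1 ++ [current_id], current_id)) := by
      funext st i
      simp only [hqdef, decide_eq_true_eq]
      rw [indicator_ite]
    rw [hstep, foldA_eq_accum (fun i => if q i then (1 : Int) else 0)
      (PySem.List.pyRange 1 (modes.length : Int) 1) [0] 0]
    have hA : [0] ++ pvAccum 0 ((PySem.List.pyRange 1 (modes.length : Int) 1).map
        (fun i => if q i then (1 : Int) else 0)) = pvAcc q (modes.length : Int) := by
      simpa using accum_eq_pvAcc q (modes.length : Int) hn
    rw [hA]
    -- B-side
    have hB := foldB_eq_expand (modes.length : Int) (pvStarts q (modes.length : Int)) 0 []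
    have hfilter : (List.filter
        (fun i => i == 0 || decide (PySem.List.pyGet? modes i ≠ PySem.List.pyGet? modes (i - 1) ∨ PySem.Set.contains bset i))
        (PySem.List.pyRange 0 (modes.length : Int) 1)) = pvStarts q (modes.length : Int) := rfl
    rw [hfilter, hB]
    simp only [List.nil_append]
    exact ((expand_starts q (modes.length : Int) hn).2.2).symm
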